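-- pv_equiv track=rewrite | github.com/wtf-sonii/CPS109_labs | labs109.py | taxi_zum_zum
-- ===== SOURCE A (Python) =====
-- def taxi_zum_zum(moves):
--     directions=['N','E','S','W']
--     dir=0
--     x=0
--     y=0
--     for i in moves:
--         if i=='L':
--             dir -= 1
--             if dir<0:
--                 dir=3
--         elif i=='R':
--             dir+=1
--             if dir>3:
--                 dir=0
--         elif i=='F':
--             if directions[dir]=='N':
--                 y+= 1
--             elif directions[dir]=='S':
--                 y -= 1
--             elif directions[dir]=='E':
--                 x += 1
--             elif directions[dir]=='W':
--                 x-=1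
--     return (x,y)
-- ===== SOURCE B (Python) =====
-- def taxi_zum_zum(moves):
--     # pass 1: net turn count (R minus L) seen before each move
--     h = 0
--     headings = []
--     for c in moves:
--         headings.append(h)
--         if c == 'R':
--             h += 1
--         elif c == 'L':
--             h -= 1
--     # pass 2: tally forward steps by heading class 0=N,1=E,2=S,3=W
--     cnt = [0, 0, 0, 0]
--     for h0, c in zip(headings, moves):
--         if c == 'F':
--             cnt[h0 % 4] += 1
--     # combine the tallies in closed form
--     return (cnt[1] - cnt[3], cnt[0] - cnt[2])
-- ===== Notes on version B (the rewrite author's own statement) =====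
-- stated objective: alternative
-- what changed: Replaces A's stateful single-pass simulation (direction index, letter table, four-way branch per forward step) by a staged computation: first build the list of net turn counts before each move, then tally forward steps per heading class mod 4, then combine the four tallies in a closed-form expression x=cnt[1]-cnt[3], y=cnt[0]-cnt[2].
import Mathlib
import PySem

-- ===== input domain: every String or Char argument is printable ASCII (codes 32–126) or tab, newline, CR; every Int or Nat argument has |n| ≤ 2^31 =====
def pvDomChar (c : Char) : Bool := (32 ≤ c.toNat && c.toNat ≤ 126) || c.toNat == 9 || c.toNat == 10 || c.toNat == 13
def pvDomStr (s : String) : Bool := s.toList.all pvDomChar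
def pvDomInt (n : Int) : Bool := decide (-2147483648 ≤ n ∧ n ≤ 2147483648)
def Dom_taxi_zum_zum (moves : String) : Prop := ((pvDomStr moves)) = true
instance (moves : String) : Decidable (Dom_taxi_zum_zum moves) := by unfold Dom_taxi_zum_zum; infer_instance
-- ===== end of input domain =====

-- B replaces A's stateful simulation by staged passes: record net turns before each move,
-- tally F-steps per heading class mod 4, combine the four tallies in closed form (alternative; same cost).

-- ===== PORT A =====
-- state: (dir, x, y)
def taxiStepA (s : Int × Int × Int) (i : Char) : Int × Int × Int :=
  let dir := s.1; let x := s.2.1; let y := s.2.2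
  if i = 'L' then
    let dir := dir - 1
    let dir := if dir < 0 then 3 else dir
    (dir, x, y)
  else if i = 'R' then
    let dir := dir + 1
    let dir := if dir > 3 then 0 else dir
    (dir, x, y)
  else if i = 'F' then
    if PySem.List.pyGet? ['N','E','S','W'] dir = some 'N' then (dir, x, y + 1)
    else if PySem.List.pyGet? ['N','E','S','W'] dir = some 'S' then (dir, x, y - 1)
    else if PySem.List.pyGet? ['N','E','S','W'] dir = some 'E' then (dir, x + 1, y)
    else if PySem.List.pyGet? ['N','E','S','W'] dir = some 'W' then (dir, x - 1, y)
    else (dir, x, y)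
  else (dir, x, y)

def taxi_zum_zum (moves : String) : Int × Int :=
  let s := moves.toList.foldl taxiStepA (0, 0, 0)
  (s.2.1, s.2.2)

-- ===== PORT B =====
-- pass 1 state: (h, headings); 'headings.append(h)' then the h update, as in Source B
def taxiPass1 (s : Int × List Int) (c : Char) : Int × List Int :=
  let hs := s.2 ++ [s.1]
  let h := if c = 'R' then s.1 + 1 else if c = 'L' then s.1 - 1 else s.1
  (h, hs)

-- pass 2: cnt[h0 % 4] += 1 on 'F'; the index is always < 4 = cnt.length, so set/getD is exact
def taxiPass2 (cnt : List Int) (p : Int × Char) : List Int :=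
  if p.2 = 'F' then
    let i := (PySem.Int.mod p.1 4).toNat
    cnt.set i (cnt.getD i 0 + 1)
  else cnt

def taxi_zum_zum_alt (moves : String) : Int × Int :=
  let l := moves.toList
  let headings := (l.foldl taxiPass1 (0, [])).2
  let cnt := (headings.zip l).foldl taxiPass2 [0, 0, 0, 0]
  (cnt.getD 1 0 - cnt.getD 3 0, cnt.getD 0 0 - cnt.getD 2 0)

-- ===== PRECONDITION & SPEC =====
def Spec_taxi_zum_zum (moves : String) (out : Int × Int) : Prop := out = taxi_zum_zum_alt moves
instance (moves : String) (out : Int × Int) : Decidable (Spec_taxi_zum_zum moves out) := by unfold Spec_taxi_zum_zum; infer_instance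

-- ===== CLAIM (what is proved, stated in full; the proofs are below) =====
def Claim_equal_taxi_zum_zum : Prop := ∀ (moves : String), Dom_taxi_zum_zum moves → Spec_taxi_zum_zum moves (taxi_zum_zum moves)

-- ===== LEMMAS AND PROOFS =====

/-- the heading list pass 1 produces, written recursively -/
def taxiHeads : List Char → Int → List Int
  | [], _ => []
  | c :: t, h => h :: taxiHeads t (if c = 'R' then h + 1 else if c = 'L' then h - 1 else h)

theorem taxiPass1_eq (l : List Char) : ∀ (h : Int) (acc : List Int),
    (l.foldl taxiPass1 (h, acc)).2 = acc ++ taxiHeads l h := by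
  induction l with
  | nil => simp [taxiHeads]
  | cons c t ih =>
    intro h acc
    simp only [List.foldl_cons, taxiPass1, taxiHeads, ih]
    simp

/-- pass 2 fused with the heading recursion -/
def taxiFused : List Char → Int → List Int → List Int
  | [], _, cnt => cnt
  | c :: t, h, cnt =>
      taxiFused t (if c = 'R' then h + 1 else if c = 'L' then h - 1 else h)
        (if c = 'F' then
          (let i := (PySem.Int.mod h 4).toNat; cnt.set i (cnt.getD i 0 + 1))
         else cnt)

theorem taxiFuse_eq (l : List Char) : ∀ (h : Int) (cnt : List Int),
    ((taxiHeads l h).zip l).foldl taxiPass2 cnt = taxiFused l h cnt := by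
  induction l with
  | nil => intro h cnt; simp [taxiHeads, taxiFused]
  | cons c t ih =>
    intro h cnt
    simp only [taxiHeads, taxiFused, List.zip_cons_cons, List.foldl_cons, taxiPass2, ih]

theorem taxiStepA_L (h x y : Int) :
    taxiStepA (PySem.Int.mod h 4, x, y) 'L' = (PySem.Int.mod (h - 1) 4, x, y) := by
  simp only [taxiStepA]
  norm_num
  split <;> omega

theorem taxiStepA_R (h x y : Int) :
    taxiStepA (PySem.Int.mod h 4, x, y) 'R' = (PySem.Int.mod (h + 1) 4, x, y) := by
  simp only [taxiStepA, if_neg (show ¬(('R':Char) = 'L') by decide)]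
  norm_num
  split <;> omega

theorem taxiStepA_F0 (x y : Int) : taxiStepA (0, x, y) 'F' = (0, x, y + 1) := by
  simp [taxiStepA, PySem.List.pyGet?, PySem.List.pyIdx?]
theorem taxiStepA_F1 (x y : Int) : taxiStepA (1, x, y) 'F' = (1, x + 1, y) := by
  simp [taxiStepA, PySem.List.pyGet?, PySem.List.pyIdx?]
theorem taxiStepA_F2 (x y : Int) : taxiStepA (2, x, y) 'F' = (2, x, y - 1) := by
  simp [taxiStepA, PySem.List.pyGet?, PySem.List.pyIdx?]
theorem taxiStepA_F3 (x y : Int) : taxiStepA (3, x, y) 'F' = (3, x - 1, y) := by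
  simp [taxiStepA, PySem.List.pyGet?, PySem.List.pyIdx?]

theorem taxiStepA_other (c : Char) (d x y : Int) (hL : c ≠ 'L') (hR : c ≠ 'R') (hF : c ≠ 'F') :
    taxiStepA (d, x, y) c = (d, x, y) := by
  simp [taxiStepA, hL, hR, hF]

theorem taxiFused_cons_turn (c : Char) (t : List Char) (h : Int) (cnt : List Int)
    (hF : c ≠ 'F') :
    taxiFused (c :: t) h cnt
      = taxiFused t (if c = 'R' then h + 1 else if c = 'L' then h - 1 else h) cnt := by
  simp [taxiFused, hF]

theorem taxiFused_cons_F (t : List Char) (h : Int) (cnt : List Int) :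
    taxiFused ('F' :: t) h cnt
      = taxiFused t h
          (cnt.set (PySem.Int.mod h 4).toNat (cnt.getD (PySem.Int.mod h 4).toNat 0 + 1)) := by
  simp [taxiFused]

/-- main invariant: A's fold started at direction h % 4 moves (x,y) by exactly the tally
    differences the fused pass accumulates -/
theorem taxi_inv (l : List Char) : ∀ (h x y c0 c1 c2 c3 : Int),
    (l.foldl taxiStepA (PySem.Int.mod h 4, x, y)).2.1
      = x + ((taxiFused l h [c0, c1, c2, c3]).getD 1 0 - c1)
          - ((taxiFused l h [c0, c1, c2, c3]).getD 3 0 - c3) ∧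
    (l.foldl taxiStepA (PySem.Int.mod h 4, x, y)).2.2
      = y + ((taxiFused l h [c0, c1, c2, c3]).getD 0 0 - c0)
          - ((taxiFused l h [c0, c1, c2, c3]).getD 2 0 - c2) := by
  induction l with
  | nil =>
    intro h x y c0 c1 c2 c3
    simp [taxiFused]
  | cons c t ih =>
    intro h x y c0 c1 c2 c3
    by_cases hF : c = 'F'
    · subst hF
      have h1 := PySem.Int.mod_nonneg h (b := 4) (by norm_num)
      have h2 := PySem.Int.mod_lt h (b := 4) (by norm_num)
      have hd : PySem.Int.mod h 4 = 0 ∨ PySem.Int.mod h 4 = 1 ∨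
          PySem.Int.mod h 4 = 2 ∨ PySem.Int.mod h 4 = 3 := by omega
      simp only [List.foldl_cons, taxiFused_cons_F]
      rcases hd with hm | hm | hm | hm <;> rw [hm]
      · rw [taxiStepA_F0, show [c0, c1, c2, c3].set (Int.toNat 0)
            ([c0, c1, c2, c3].getD (Int.toNat 0) 0 + 1) = [c0 + 1, c1, c2, c3] from rfl]
        have h0 := ih h x (y + 1) (c0 + 1) c1 c2 c3
        rw [hm] at h0
        exact ⟨by omega, by omega⟩
      · rw [taxiStepA_F1, show [c0, c1, c2, c3].set (Int.toNat 1)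
            ([c0, c1, c2, c3].getD (Int.toNat 1) 0 + 1) = [c0, c1 + 1, c2, c3] from rfl]
        have h0 := ih h (x + 1) y c0 (c1 + 1) c2 c3
        rw [hm] at h0
        exact ⟨by omega, by omega⟩
      · rw [taxiStepA_F2, show [c0, c1, c2, c3].set (Int.toNat 2)
            ([c0, c1, c2, c3].getD (Int.toNat 2) 0 + 1) = [c0, c1, c2 + 1, c3] from rfl]
        have h0 := ih h x (y - 1) c0 c1 (c2 + 1) c3
        rw [hm] at h0
        exact ⟨by omega, by omega⟩
      · rw [taxiStepA_F3, show [c0, c1, c2, c3].set (Int.toNat 3)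
            ([c0, c1, c2, c3].getD (Int.toNat 3) 0 + 1) = [c0, c1, c2, c3 + 1] from rfl]
        have h0 := ih h (x - 1) y c0 c1 c2 (c3 + 1)
        rw [hm] at h0
        exact ⟨by omega, by omega⟩
    · rw [taxiFused_cons_turn c t h _ hF]
      by_cases hL : c = 'L'
      · subst hL
        rw [List.foldl_cons, taxiStepA_L, if_neg (show ¬(('L':Char) = 'R') by decide), if_pos rfl]
        exact ih (h - 1) x y c0 c1 c2 c3
      · by_cases hR : c = 'R'
        · subst hR
          rw [List.foldl_cons, taxiStepA_R, if_pos rfl]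
          exact ih (h + 1) x y c0 c1 c2 c3
        · rw [List.foldl_cons, taxiStepA_other c _ x y hL hR hF, if_neg hR, if_neg hL]
          exact ih h x y c0 c1 c2 c3

-- ===== VERDICT (by name: the statement is the Claim_ definition above) =====
theorem taxi_zum_zum_spec : Claim_equal_taxi_zum_zum := by
  intro moves _
  unfold Spec_taxi_zum_zum taxi_zum_zum taxi_zum_zum_alt
  have hinv := taxi_inv moves.toList 0 0 0 0 0 0 0
  rw [show PySem.Int.mod 0 4 = 0 by decide] at hinv
  simp only [taxiPass1_eq, List.nil_append, taxiFuse_eq]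
  exact Prod.ext (by omega) (by omega)
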